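-- pv_equiv track=rewrite | github.com/nidahameed/506archive | assignments/ps_05/problem_set_05.py | play_blinkbot_scrabble
-- ===== SOURCE A (Python) =====
-- def count_vowels(word):
--     lower_word = word.lower()
--     num_a = lower_word.count("a")
--     num_e = lower_word.count("e")
--     num_i = lower_word.count("i")
--     num_o = lower_word.count("o")
--     num_u = lower_word.count("u")
--     total_vowels = num_a + num_e + num_i + num_o + num_u
--     return total_vowels
--
-- def who_wins(player1_score, player2_score):
--     a = 'Player 1 wins! Yay!'
--     b = 'Player 2 wins! Boo.'
--     c = "It was a tie! Well that's boring."
--     if player1_score > player2_score: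
--         return a
--     elif player1_score < player2_score:
--         return b
--     else:
--         return c
--
-- def play_blinkbot_scrabble(player1_input, player2_input):
--     counter_p1 = 0
--     counter_p2 = 0
--     for words in player1_input:
--         player1_score = count_vowels(words)
--         counter_p1 += player1_score
--     for words in player2_input:
--         player2_score = count_vowels(words)
--         counter_p2 += player2_score
--     return who_wins(counter_p1, counter_p2)
-- ===== SOURCE B (Python) =====
-- VOWELS = set("aeiou")
--
-- def _vowel_total(word):
--     return sum(1 for ch in word.lower() if ch in VOWELS)
--
-- def play_blinkbot_scrabble(player1_input, player2_input):
--     p1 = sum(_vowel_total(w) for w in player1_input)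
--     p2 = sum(_vowel_total(w) for w in player2_input)
--     if p1 > p2:
--         return 'Player 1 wins! Yay!'
--     if p1 < p2:
--         return 'Player 2 wins! Boo.'
--     return "It was a tie! Well that's boring."
-- ===== Notes on version B (the rewrite author's own statement) =====
-- stated objective: simpler
-- what changed: Per word, five full .count scans (one per vowel) are replaced by a single pass counting membership in a vowel set, and the two explicit accumulator loops become sum() expressions over the word lists.
import Mathlib
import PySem

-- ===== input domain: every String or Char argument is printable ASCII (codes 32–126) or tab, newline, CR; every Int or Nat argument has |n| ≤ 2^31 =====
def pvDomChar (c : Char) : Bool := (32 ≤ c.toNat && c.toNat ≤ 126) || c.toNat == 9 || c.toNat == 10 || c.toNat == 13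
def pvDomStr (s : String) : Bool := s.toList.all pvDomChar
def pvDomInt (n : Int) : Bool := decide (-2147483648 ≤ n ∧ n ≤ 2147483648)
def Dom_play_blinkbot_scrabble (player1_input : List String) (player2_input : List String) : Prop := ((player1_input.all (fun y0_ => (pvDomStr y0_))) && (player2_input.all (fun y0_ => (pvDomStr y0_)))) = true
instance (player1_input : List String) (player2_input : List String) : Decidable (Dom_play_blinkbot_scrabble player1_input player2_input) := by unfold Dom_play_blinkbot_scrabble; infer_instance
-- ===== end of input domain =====

-- B replaces the five per-vowel .count scans with a single membership-counting pass per word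
-- and the two accumulation loops with sums over the word lists (simpler, same behaviour).


-- ===== PORT A =====
def count_vowels (word : String) : Int :=
  let lower_word := PySem.Str.lower word
  let num_a : Int := (PySem.Str.count lower_word "a" : Int)
  let num_e : Int := (PySem.Str.count lower_word "e" : Int)
  let num_i : Int := (PySem.Str.count lower_word "i" : Int)
  let num_o : Int := (PySem.Str.count lower_word "o" : Int)
  let num_u : Int := (PySem.Str.count lower_word "u" : Int)
  num_a + num_e + num_i + num_o + num_u

def who_wins (player1_score : Int) (player2_score : Int) : String :=
  let a := "Player 1 wins! Yay!"
  let b := "Player 2 wins! Boo."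
  let c := "It was a tie! Well that's boring."
  if player1_score > player2_score then a
  else if player1_score < player2_score then b
  else c

def play_blinkbot_scrabble (player1_input : List String) (player2_input : List String) : String :=
  let counter_p1 : Int := player1_input.foldl (fun acc words => acc + count_vowels words) 0
  let counter_p2 : Int := player2_input.foldl (fun acc words => acc + count_vowels words) 0
  who_wins counter_p1 counter_p2

-- ===== PORT B =====
def vowel_total_alt (word : String) : Int :=
  (((PySem.Str.lower word).toList.countP
      (fun ch => ch ∈ (['a', 'e', 'i', 'o', 'u'] : List Char)) : Nat) : Int)

def play_blinkbot_scrabble_alt (player1_input : List String) (player2_input : List String) : String :=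
  let p1 : Int := (player1_input.map vowel_total_alt).sum
  let p2 : Int := (player2_input.map vowel_total_alt).sum
  if p1 > p2 then "Player 1 wins! Yay!"
  else if p1 < p2 then "Player 2 wins! Boo."
  else "It was a tie! Well that's boring."

-- ===== PRECONDITION & SPEC =====
def Spec_play_blinkbot_scrabble (player1_input : List String) (player2_input : List String) (out : String) : Prop := out = play_blinkbot_scrabble_alt player1_input player2_input
instance (player1_input : List String) (player2_input : List String) (out : String) : Decidable (Spec_play_blinkbot_scrabble player1_input player2_input out) := by unfold Spec_play_blinkbot_scrabble; infer_instance

-- ===== CLAIM (what is proved, stated in full; the proofs are below) =====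
def Claim_equal_play_blinkbot_scrabble : Prop := ∀ (player1_input : List String) (player2_input : List String), Dom_play_blinkbot_scrabble player1_input player2_input → Spec_play_blinkbot_scrabble player1_input player2_input (play_blinkbot_scrabble player1_input player2_input)

-- ===== LEMMAS AND PROOFS =====

-- Python's s.count(c) for a single character c is the character count.
theorem chars_count_go_single (c : Char) (l : List Char) :
    ∀ (fuel acc : Nat), l.length ≤ fuel →
      PySem.Chars.count.go [c] fuel l acc = acc + l.count c := by
  induction l with
  | nil => intro fuel acc _; cases fuel <;> simp [PySem.Chars.count.go]
  | cons h t ih =>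
    intro fuel acc hf
    cases fuel with
    | zero => simp at hf
    | succ n =>
      by_cases hc : h = c
      · simp [PySem.Chars.count.go, List.isPrefixOf, hc,
          ih n (acc + 1) (by simpa using Nat.lt_succ_iff.mp (Nat.lt_of_lt_of_le (Nat.lt_succ_of_le le_rfl) hf))]
        omega
      · have : ([c].isPrefixOf (h :: t)) = false := by
          simp [List.isPrefixOf]; exact fun e => hc e.symm
        simp [PySem.Chars.count.go, this,
          ih n acc (by simpa using Nat.succ_le_succ_iff.mp hf), hc]

theorem chars_count_single (c : Char) (l : List Char) :
    PySem.Chars.count l [c] = l.count c := by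
  simp [PySem.Chars.count, chars_count_go_single c l l.length 0 le_rfl]

-- The five per-vowel counts sum to one membership count.
theorem five_counts_eq_countP (l : List Char) :
    (l.count 'a' : Int) + l.count 'e' + l.count 'i' + l.count 'o' + l.count 'u'
      = (l.countP (fun ch => ch ∈ (['a', 'e', 'i', 'o', 'u'] : List Char)) : Nat) := by
  induction l with
  | nil => simp
  | cons h t ih =>
    simp only [List.count_cons, List.countP_cons, List.mem_cons, List.not_mem_nil, or_false]
    by_cases ha : h = 'a' <;> by_cases he : h = 'e' <;> by_cases hi : h = 'i' <;>
      by_cases ho : h = 'o' <;> by_cases hu : h = 'u' <;>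
      simp_all <;> omega

theorem count_vowels_eq_alt (word : String) : count_vowels word = vowel_total_alt word := by
  unfold count_vowels vowel_total_alt
  simp only [PySem.Str.count_eq]
  have ha : ("a" : String).toList = ['a'] := rfl
  have he : ("e" : String).toList = ['e'] := rfl
  have hi : ("i" : String).toList = ['i'] := rfl
  have ho : ("o" : String).toList = ['o'] := rfl
  have hu : ("u" : String).toList = ['u'] := rfl
  rw [ha, he, hi, ho, hu]
  simp only [chars_count_single]
  exact five_counts_eq_countP _

-- ===== VERDICT (by name: the statement is the Claim_ definition above) =====
theorem play_blinkbot_scrabble_spec : Claim_equal_play_blinkbot_scrabble := by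
  intro p1 p2 _
  unfold Spec_play_blinkbot_scrabble play_blinkbot_scrabble play_blinkbot_scrabble_alt who_wins
  simp only [PySem.List.foldl_add, zero_add,
    (funext count_vowels_eq_alt : count_vowels = vowel_total_alt)]
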